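-- pv_equiv track=rewrite | github.com/artel1992/Python_lessons_basic | lesson02/home_work/hw02_hard.py | bashnya
-- ===== SOURCE A (Python) =====
-- def bashnya(count):
--     a=1
--     i=2
--     b=count
--     e=1
--     c=0
--     while b>a:
--         n = 1
--         a+=i*i
--         e+=i
--         c=a-b
--         test=(a-i*i)+1
--         z=(e-i)+1
--         while n<=i:
--             if test!=b:
--                 test+=1
--                 n += 1
--                 if n==i and test!=b:
--                     z+=1
--                     n=0
--             if test==b:
--                 break
--         i += 1
--     return z,n
-- ===== SOURCE B (Python) =====
-- def bashnya(count):
--     # find the level (block of level x level rows) containing `count` by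
--     # accumulating sums of squares, then locate row/column by divmod
--     level, s = 1, 1
--     while s < count:
--         level += 1
--         s += level * level
--     d = count - (s - level * level) - 1
--     row = level * (level - 1) // 2 + 1 + d // level
--     return row, d % level + 1
-- ===== Notes on version B (the rewrite author's own statement) =====
-- stated objective: faster
-- what changed: A scans number by number inside each level with a nested counter loop (O(count) steps); B finds the level by accumulating sums of squares (O(count^(1/3)) iterations) and then computes row and column directly with divmod.
-- outside the precondition, e.g. on bashnya(1): A raises UnboundLocalError, B returns (1, 1)
import Mathlib
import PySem

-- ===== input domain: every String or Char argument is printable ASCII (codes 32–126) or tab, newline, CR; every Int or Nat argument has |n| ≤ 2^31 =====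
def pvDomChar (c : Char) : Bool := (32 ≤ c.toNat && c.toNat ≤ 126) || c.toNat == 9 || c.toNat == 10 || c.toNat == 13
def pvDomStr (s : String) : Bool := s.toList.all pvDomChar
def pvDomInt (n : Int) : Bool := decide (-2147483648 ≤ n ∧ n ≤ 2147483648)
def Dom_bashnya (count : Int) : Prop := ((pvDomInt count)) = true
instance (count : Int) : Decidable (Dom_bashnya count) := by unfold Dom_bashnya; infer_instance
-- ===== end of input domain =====

-- B replaces A's per-number inner scan by a sum-of-squares level loop plus divmod (measured much faster).

-- ===== PORT A =====
-- inner `while n <= i` loop; fuel (b - test).toNat + 1 is an upper bound on the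
-- number of Python iterations (test increases by 1 each round until it reaches b),
-- so the fuel-0 branch is never taken on the states the outer loop produces
def bashnyaInner (i b : Int) : Nat → Int → Int → Int → Int × Int
  | 0, _, n, z => (z, n)
  | fuel + 1, test, n, z =>
    if n ≤ i then
      if test ≠ b then
        let test' := test + 1
        let n1 := n + 1
        let zn2 : Int × Int := if n1 = i ∧ test' ≠ b then (z + 1, 0) else (z, n1)
        if test' = b then zn2 else bashnyaInner i b fuel test' zn2.2 zn2.1
      else (z, n)
    else (z, n)

-- outer `while b > a` loop; fuel count.toNat bounds its iterations (a grows by i*i ≥ 4)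
def bashnyaOuter (b : Int) : Nat → Int → Int → Int → Int × Int → Int × Int
  | 0, _, _, _, zn => zn
  | fuel + 1, a, i, e, zn =>
    if b > a then
      let n : Int := 1
      let a' := a + i * i
      let e' := e + i
      -- c = a' - b is dead code in A (never read), omitted
      let test := (a' - i * i) + 1
      let z := (e' - i) + 1
      let zn' := bashnyaInner i b ((b - test).toNat + 1) test n z
      bashnyaOuter b fuel a' (i + 1) e' zn'
    else zn

def bashnya (count : Int) : Int × Int :=
  -- a=1, i=2, b=count, e=1; z and n are first assigned inside the loop, so for
  -- count ≤ 1 Python raises UnboundLocalError (excluded by Pre_); (0, 0) is a dummy seed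
  bashnyaOuter count count.toNat 1 2 1 (0, 0)

-- ===== PORT B =====
-- level-finding loop of Source B; fuel count.toNat bounds its iterations (s grows by ≥ 4)
def altLevel (count : Int) : Nat → Int × Int → Int × Int
  | 0, ls => ls
  | fuel + 1, (level, s) =>
    if s < count then altLevel count fuel (level + 1, s + (level + 1) * (level + 1))
    else (level, s)

-- the divmod tail of Source B
def altFin (count : Int) (ls : Int × Int) : Int × Int :=
  let level := ls.1
  let s := ls.2
  let d := count - (s - level * level) - 1
  let row := PySem.Int.floordiv (level * (level - 1)) 2 + 1 + PySem.Int.floordiv d level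
  (row, PySem.Int.mod d level + 1)

def bashnya_alt (count : Int) : Int × Int :=
  altFin count (altLevel count count.toNat (1, 1))

-- ===== PRECONDITION & SPEC =====
-- Pre_ excludes exactly count ≤ 1, where A raises UnboundLocalError (z, n never assigned)
def Pre_bashnya (count : Int) : Prop := 2 ≤ count
instance (count : Int) : Decidable (Pre_bashnya count) := by unfold Pre_bashnya; infer_instance
def pvWitness_bashnya : Int := 5

def Spec_bashnya (count : Int) (out : Int × Int) : Prop := out = bashnya_alt count
instance (count : Int) (out : Int × Int) : Decidable (Spec_bashnya count out) := by unfold Spec_bashnya; infer_instance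

-- ===== CLAIM (what is proved, stated in full; the proofs are below) =====
def Claim_equal_bashnya : Prop := ∀ (count : Int), Dom_bashnya count → Pre_bashnya count → Spec_bashnya count (bashnya count)

-- ===== LEMMAS AND PROOFS =====

-- A's inner loop, started anywhere in its cycle, is a divmod: it walks test up to b,
-- with n cycling 1..i (reset to 0 at i when not done) and z counting completed cycles.
lemma bashnyaInner_eq (i b : Int) (hi : 2 ≤ i) :
    ∀ (fuel : Nat) (test n z : Int), 0 ≤ n → n ≤ i - 1 → test ≤ b → (n = 0 → test < b) →
    (b - test).toNat < fuel →
    bashnyaInner i b fuel test n z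
      = (z + (b - test + n - 1) / i, (b - test + n - 1) % i + 1) := by
  intro fuel
  induction fuel with
  | zero => intro test n z _ _ _ _ hf; omega
  | succ f ih =>
    intro test n z hn0 hni htb hnz hf
    by_cases hteq : test = b
    · have hn1 : 1 ≤ n := by by_contra h; exact absurd (hnz (by omega)) (by omega)
      have hd : (n - 1) / i = 0 := Int.ediv_eq_zero_of_lt (by omega) (by omega)
      have hm : (n - 1) % i = n - 1 := Int.emod_eq_of_lt (by omega) (by omega)
      simp only [bashnyaInner, if_pos (show n ≤ i by omega), hteq]
      simp only [ne_eq, not_true_eq_false, reduceIte]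
      have : b - b + n - 1 = n - 1 := by ring
      rw [this, hd, hm]
      rw [Prod.mk.injEq]; exact ⟨by omega, by omega⟩
    · have htlt : test < b := lt_of_le_of_ne htb hteq
      simp only [bashnyaInner, if_pos (show n ≤ i by omega), if_pos hteq, ne_eq]
      by_cases hbr : test + 1 = b
      · -- break in this iteration; the reset guard cannot fire since test' = b
        have hres : ¬ (n + 1 = i ∧ ¬ test + 1 = b) := by tauto
        simp only [hbr, not_true_eq_false, and_false, reduceIte]
        have harg : b - test + n - 1 = n := by omega
        rw [harg, Int.ediv_eq_zero_of_lt (by omega) (by omega),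
            Int.emod_eq_of_lt (by omega) (by omega)]
        rw [Prod.mk.injEq]; exact ⟨by omega, by omega⟩
      · by_cases hres : n + 1 = i
        · -- n reaches i while not done: z increments, n resets to 0
          simp only [hbr, hres, not_false_eq_true, and_true, reduceIte]
          have hfu : (b - (test + 1)).toNat < f := by omega
          rw [ih (test + 1) 0 (z + 1) le_rfl (by omega) (by omega) (fun _ => by omega) hfu]
          have h1 : b - (test + 1) + 0 - 1 = (b - test - 2) := by ring
          have h2 : b - test + n - 1 = (b - test - 2) + 1 * i := by omega
          rw [h1, h2, Int.add_mul_ediv_right _ _ (by omega : i ≠ 0), Int.add_mul_emod_self_right]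
          rw [Prod.mk.injEq]; exact ⟨by omega, by omega⟩
        · -- ordinary step: test and n advance together
          simp only [hres, false_and, reduceIte, if_neg hbr]
          have hfu2 : (b - (test + 1)).toNat < f := by omega
          rw [ih (test + 1) (n + 1) z (by omega) (by omega) (by omega) (fun h => by omega) hfu2]
          have : b - (test + 1) + (n + 1) - 1 = b - test + n - 1 := by ring
          rw [this]

lemma bashnyaOuter_stop (b : Int) (fuel : Nat) (a i e : Int) (zn : Int × Int)
    (h : ¬ b > a) : bashnyaOuter b fuel a i e zn = zn := by
  cases fuel with
  | zero => rfl
  | succ f => simp only [bashnyaOuter, if_neg h]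

lemma altLevel_stop (count : Int) (fuel : Nat) (level s : Int)
    (h : ¬ s < count) : altLevel count fuel (level, s) = (level, s) := by
  cases fuel with
  | zero => rfl
  | succ f => simp only [altLevel, if_neg h]

-- the two loops walk the levels in lockstep: A's (a, i, e) is B's (s, level + 1, level*(level+1)/2)
lemma main_eq (b : Int) :
    ∀ (fuelA fuelB : Nat) (a i e : Int) (zn : Int × Int), 2 ≤ i → a < b →
    b - a ≤ 4 * fuelA → b - a ≤ 4 * fuelB → 2 * e = i * (i - 1) →
    bashnyaOuter b fuelA a i e zn = altFin b (altLevel b fuelB (i - 1, a)) := by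
  intro fuelA
  induction fuelA with
  | zero => intro fuelB a i e zn _ hab hfa _ _; omega
  | succ fA ih =>
    intro fuelB a i e zn hi hab hfa hfb h2e
    have hii : 4 ≤ i * i := by nlinarith
    cases fuelB with
    | zero => omega
    | succ fB =>
      have htest : (a + i * i - i * i) + 1 = a + 1 := by ring
      have hz : (e + i - i) + 1 = e + 1 := by ring
      simp only [bashnyaOuter, altLevel, if_pos hab, htest, hz]
      have hstep : i - 1 + 1 = i := by ring
      have hstep2 : a + (i - 1 + 1) * (i - 1 + 1) = a + i * i := by ring
      rw [hstep2]
      rw [bashnyaInner_eq i b hi _ (a + 1) 1 (e + 1) (by omega) (by omega) (by omega)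
            (fun h => by omega) (by omega)]
      by_cases hcont : b > a + i * i
      · rw [ih fB (a + i * i) (i + 1) (e + i) _ (by omega) hcont (by omega) (by omega)
              (by linear_combination h2e)]
        have : i + 1 - 1 = i - 1 + 1 := by ring
        rw [this]
      · rw [bashnyaOuter_stop b fA _ _ _ _ hcont, hstep, altLevel_stop b fB i (a + i * i) hcont]
        have hd : b - (a + i * i - i * i) - 1 = b - a + 1 - 1 - 1 := by ring
        simp only [altFin, hd]
        rw [PySem.Int.floordiv_eq_ediv_of_pos (by omega : (0:Int) < 2),
            PySem.Int.floordiv_eq_ediv_of_pos (by omega : (0:Int) < i),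
            PySem.Int.mod_eq_emod_of_pos (by omega : (0:Int) < i)]
        have he : i * (i - 1) / 2 = e := by
          rw [← h2e, mul_comm, Int.mul_ediv_cancel _ (by omega : (2:Int) ≠ 0)]
        rw [he]
        have harg : b - (a + 1) + 1 - 1 = b - a + 1 - 1 - 1 := by ring
        rw [harg]

-- ===== VERDICT (by name: the statement is the Claim_ definition above) =====
theorem bashnya_spec : Claim_equal_bashnya := by
  intro count _ hpre
  have h2 : 2 ≤ count := hpre
  show bashnya count = bashnya_alt count
  unfold bashnya bashnya_alt
  have hc : (count.toNat : Int) = count := Int.toNat_of_nonneg (by omega)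
  have := main_eq count count.toNat count.toNat 1 2 1 (0, 0) (by omega) (by omega)
      (by omega) (by omega) (by norm_num)
  simpa using this
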